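-- pv_equiv track=rewrite | github.com/mauryada/CSE231 | proj06.py | white_vs_minority
-- ===== SOURCE A (Python) =====
-- def white_vs_minority(L):
--     """This funtion takes a list of tupple with race, gender and victim details
--     and them counts the number of black, hispanic and white people in
--     the list """
--     hispanic_count=0
--     black_count=0
--     white_count=0
--     race_count=0
--     for item in L:#loop till the end of list
--
--         if item[0]=='white':#if the accused is a white person
--             white_count+=1#increment the white count
--         elif item[0]=='black':#if the accused is a black person
--             black_count+=1#increment the black counts
--         elif item[0]=='hispanic':#if the accused is hispanic person
--             hispanic_count+=1#increments the hispanic count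
--         else: #in case the data is not available it continues the loop
--             continue#so that the entire race count is not affected
--         race_count+=1#increments count for accused whose race is available
--     return race_count,white_count,hispanic_count,black_count#returns the data
-- ===== SOURCE B (Python) =====
-- def white_vs_minority(L):
--     """Staged re-implementation: extract the first fields once, then let the
--     library count each label in separate passes (no stateful counting loop)."""
--     keys = [item[0] for item in L]
--     white = keys.count('white')
--     hispanic = keys.count('hispanic')
--     black = keys.count('black')
--     return white + hispanic + black, white, hispanic, black
-- ===== Notes on version B (the rewrite author's own statement) =====
-- stated objective: idiomatic
-- what changed: Replaces the single stateful if/elif counting loop with staged passes: a comprehension projects the first fields, then three list.count library scans produce the counts and their sum.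
-- outside the precondition, e.g. on white_vs_minority([()]): A raises IndexError, B raises IndexError
import Mathlib
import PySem

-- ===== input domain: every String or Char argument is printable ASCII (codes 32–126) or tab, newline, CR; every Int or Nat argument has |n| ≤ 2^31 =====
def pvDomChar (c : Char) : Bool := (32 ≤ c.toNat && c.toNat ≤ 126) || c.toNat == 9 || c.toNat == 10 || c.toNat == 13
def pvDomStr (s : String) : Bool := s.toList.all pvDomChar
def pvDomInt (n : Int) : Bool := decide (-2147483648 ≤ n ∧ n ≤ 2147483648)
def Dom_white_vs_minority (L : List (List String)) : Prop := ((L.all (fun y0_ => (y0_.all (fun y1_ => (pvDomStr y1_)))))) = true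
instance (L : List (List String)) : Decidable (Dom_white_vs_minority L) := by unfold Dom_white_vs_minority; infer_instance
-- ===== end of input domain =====

-- ===== PORT A =====
-- B replaces the stateful if/elif loop by staged passes: project the first fields, count each label with the library. Same O(n) cost.
def white_vs_minority (L : List (List String)) : Int × Int × Int × Int :=
  L.foldl (fun (st : Int × Int × Int × Int) item =>
    let x := (PySem.List.pyGet? item 0).getD ""   -- item[0]; Pre_ guarantees the index is in range
    if x = "white" then (st.1 + 1, st.2.1 + 1, st.2.2.1, st.2.2.2)
    else if x = "black" then (st.1 + 1, st.2.1, st.2.2.1, st.2.2.2 + 1)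
    else if x = "hispanic" then (st.1 + 1, st.2.1, st.2.2.1 + 1, st.2.2.2)
    else st) (0, 0, 0, 0)

-- ===== PORT B =====
def white_vs_minority_alt (L : List (List String)) : Int × Int × Int × Int :=
  let keys := L.map (fun item => (PySem.List.pyGet? item 0).getD "")   -- item[0]; Pre_ guarantees the index is in range
  let white := PySem.List.count keys "white"
  let hispanic := PySem.List.count keys "hispanic"
  let black := PySem.List.count keys "black"
  (white + hispanic + black, white, hispanic, black)

-- ===== PRECONDITION & SPEC =====
-- Pre_ excludes exactly the inputs where A raises: an empty inner list makes item[0] an IndexError.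
def Pre_white_vs_minority (L : List (List String)) : Prop := ∀ item ∈ L, item ≠ []
instance (L : List (List String)) : Decidable (Pre_white_vs_minority L) := by unfold Pre_white_vs_minority; infer_instance
def pvWitness_white_vs_minority : List (List String) := [["white", "m"], ["black"], ["n/a"], ["hispanic"]]
def Spec_white_vs_minority (L : List (List String)) (out : Int × Int × Int × Int) : Prop := out = white_vs_minority_alt L
instance (L : List (List String)) (out : Int × Int × Int × Int) : Decidable (Spec_white_vs_minority L out) := by unfold Spec_white_vs_minority; infer_instance

-- ===== CLAIM (what is proved, stated in full; the proofs are below) =====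
def Claim_equal_white_vs_minority : Prop := ∀ (L : List (List String)), Dom_white_vs_minority L → Pre_white_vs_minority L → Spec_white_vs_minority L (white_vs_minority L)

-- ===== LEMMAS AND PROOFS =====

-- the first fields of the rows, as both programs read them
def pvKeys (L : List (List String)) : List String :=
  L.map (fun item => (PySem.List.pyGet? item 0).getD "")

lemma pvA_fold (L : List (List String)) (r w h b : Int) :
    L.foldl (fun (st : Int × Int × Int × Int) item =>
      let x := (PySem.List.pyGet? item 0).getD ""
      if x = "white" then (st.1 + 1, st.2.1 + 1, st.2.2.1, st.2.2.2)
      else if x = "black" then (st.1 + 1, st.2.1, st.2.2.1, st.2.2.2 + 1)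
      else if x = "hispanic" then (st.1 + 1, st.2.1, st.2.2.1 + 1, st.2.2.2)
      else st) (r, w, h, b)
    = (r + ((pvKeys L).count "white" + (pvKeys L).count "hispanic" + (pvKeys L).count "black"),
       w + (pvKeys L).count "white", h + (pvKeys L).count "hispanic", b + (pvKeys L).count "black") := by
  induction L generalizing r w h b with
  | nil => simp [pvKeys]
  | cons item tl ih =>
    have hkeys : pvKeys (item :: tl) = ((PySem.List.pyGet? item 0).getD "") :: pvKeys tl := rfl
    simp only [List.foldl_cons, hkeys]
    by_cases h1 : (PySem.List.pyGet? item 0).getD "" = "white"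
    · rw [if_pos h1, ih, h1]
      simp [Prod.ext_iff]
      omega
    rw [if_neg h1]
    by_cases h2 : (PySem.List.pyGet? item 0).getD "" = "black"
    · rw [if_pos h2, ih, h2]
      simp [Prod.ext_iff]
      omega
    rw [if_neg h2]
    by_cases h3 : (PySem.List.pyGet? item 0).getD "" = "hispanic"
    · rw [if_pos h3, ih, h3]
      simp [Prod.ext_iff]
      omega
    · rw [if_neg h3, ih]
      simp [h1, h2, h3]

-- ===== VERDICT (by name: the statement is the Claim_ definition above) =====
theorem white_vs_minority_spec : Claim_equal_white_vs_minority := by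
  intro L _ _
  unfold Spec_white_vs_minority white_vs_minority white_vs_minority_alt
  rw [pvA_fold]
  simp [PySem.List.count_eq, pvKeys]
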